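-- pv_equiv track=rewrite | github.com/luyifan/ContentSearch | 信息检索包括report和代码和ppt/code/searchengine/dowithfile.py | dowithfont2
-- ===== SOURCE A (Python) =====
-- def dowithfont2 ( str1 ):
--
--     start = 0
--     str2 = ''
--     while( True ):
--         agostart = start
--         start = str1.find ( "[/font]" , start )
--         if ( start == -1 ):
--             break
--         str2 = str2 + str1 [ agostart : start ]
--         final = str1.find ( "]" , start )
--         start = final + 1
--     stringlen = len ( str1 )
--     str2 = str2 + str1 [ agostart : stringlen ]
--     return str2
-- ===== SOURCE B (Python) =====
-- def dowithfont2(str1):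
--     return str1.replace('[/font]', '')
-- ===== Notes on version B (the rewrite author's own statement) =====
-- stated objective: idiomatic
-- what changed: Replaced the manual find/slice index-tracking while-loop with a single str.replace call deleting every occurrence of the tag, after observing that the inner find for the closing bracket always resolves to the tag's own bracket.
import Mathlib
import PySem

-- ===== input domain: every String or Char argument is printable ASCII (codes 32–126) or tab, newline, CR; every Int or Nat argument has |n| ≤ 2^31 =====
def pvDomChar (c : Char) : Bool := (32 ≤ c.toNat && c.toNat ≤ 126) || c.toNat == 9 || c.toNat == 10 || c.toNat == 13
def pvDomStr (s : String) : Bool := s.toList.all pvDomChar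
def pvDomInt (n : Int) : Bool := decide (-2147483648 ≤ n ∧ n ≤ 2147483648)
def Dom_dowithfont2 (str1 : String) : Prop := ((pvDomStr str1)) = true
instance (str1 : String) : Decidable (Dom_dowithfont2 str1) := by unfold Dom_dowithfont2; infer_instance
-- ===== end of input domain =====

-- B strips every '[/font]' tag with a single str.replace call instead of A's manual
-- find/slice index-tracking loop (A's find(']', start) always hits the tag's own bracket); objective: idiomatic.

-- ===== PORT A =====
-- while True: agostart := start; start := str1.find('[/font]', start); break/append/advance.
-- fuel = len+1 only makes the recursion total; each iteration consumes ≥ 7 characters, so it never runs out.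
def pvFontLoop (s : List Char) (fuel : Nat) (start : Int) (str2 : List Char) : List Char :=
  match fuel with
  | 0 => str2
  | fuel + 1 =>
    let agostart := start
    let start1 := PySem.Chars.findFrom s "[/font]".toList start none
    if start1 = -1 then
      -- break, then str2 = str2 + str1[agostart:stringlen]
      str2 ++ PySem.List.slice s (some agostart) (some (s.length : Int))
    else
      let str2' := str2 ++ PySem.List.slice s (some agostart) (some start1)
      let final := PySem.Chars.findFrom s "]".toList start1 none
      pvFontLoop s fuel (final + 1) str2'

def dowithfont2 (str1 : String) : String :=
  String.ofList (pvFontLoop str1.toList (str1.toList.length + 1) 0 [])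

-- ===== PORT B =====
def dowithfont2_alt (str1 : String) : String :=
  PySem.Str.replace str1 "[/font]" ""

-- ===== PRECONDITION & SPEC =====
def Spec_dowithfont2 (str1 : String) (out : String) : Prop := out = dowithfont2_alt str1
instance (str1 : String) (out : String) : Decidable (Spec_dowithfont2 str1 out) := by unfold Spec_dowithfont2; infer_instance

-- ===== CLAIM (what is proved, stated in full; the proofs are below) =====
def Claim_equal_dowithfont2 : Prop := ∀ (str1 : String), Dom_dowithfont2 str1 → Spec_dowithfont2 str1 (dowithfont2 str1)

-- ===== LEMMAS AND PROOFS =====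

def pvPat : List Char := "[/font]".toList

-- reference recursive "delete every occurrence of pvPat" function both ports are reduced to
def stripR : List Char → List Char
  | [] => []
  | c :: t => if pvPat.isPrefixOf (c :: t) then stripR (t.drop 6) else c :: stripR t
termination_by l => l.length
decreasing_by
  all_goals simp

lemma pvPat_length : pvPat.length = 7 := by decide

lemma infix_of_infix_tail {l t : List Char} {c : Char} (h : l <:+: t) : l <:+: c :: t :=
  List.infix_cons h

lemma stripR_noOcc : ∀ l : List Char, ¬ pvPat <:+: l → stripR l = l := by
  intro l
  induction l using stripR.induct with
  | case1 => intro _; simp [stripR]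
  | case2 c t hpre ih =>
    intro h
    exact absurd ((List.isPrefixOf_iff_prefix.mp hpre).isInfix) h
  | case3 c t hpre ih =>
    intro h
    rw [stripR, if_neg hpre, ih (fun hi => h (infix_of_infix_tail hi))]

lemma stripR_split : ∀ (j : Nat) (l : List Char), pvPat <+: l.drop j →
    (∀ i, i < j → ¬ pvPat <+: l.drop i) →
    stripR l = l.take j ++ stripR (l.drop (j + 7)) := by
  intro j
  induction j with
  | zero =>
    intro l hp _
    simp only [List.drop_zero] at hp
    obtain ⟨rest, hrest⟩ := hp
    subst hrest
    have h : pvPat = '[' :: '/' :: 'f' :: 'o' :: 'n' :: 't' :: ']' :: [] := by decide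
    rw [stripR.eq_def, h]
    simp [List.isPrefixOf]
  | succ j ih =>
    intro l hp hmin
    have hne : l ≠ [] := by
      intro h; subst h
      simp at hp
      have := pvPat_length
      rw [hp] at this; simp at this
    obtain ⟨c, t, rfl⟩ := List.exists_cons_of_ne_nil hne
    have h0 : ¬ pvPat <+: (c :: t) := by
      have := hmin 0 (by omega); simpa using this
    rw [stripR, if_neg (fun hb => h0 (List.isPrefixOf_iff_prefix.mp hb))]
    have ht : stripR t = t.take j ++ stripR (t.drop (j + 7)) := by
      apply ih
      · simpa using hp
      · intro i hi
        have := hmin (i + 1) (by omega)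
        simpa using this
    rw [ht]
    simp [List.take_succ_cons]

lemma go_acc (old new : List Char) : ∀ (fuel : Nat) (l acc : List Char),
    PySem.Chars.replace.go old new fuel l acc = acc.reverse ++ PySem.Chars.replace.go old new fuel l [] := by
  intro fuel
  induction fuel with
  | zero => intro l acc; simp [PySem.Chars.replace.go]
  | succ f ih =>
    intro l acc
    cases l with
    | nil => simp [PySem.Chars.replace.go]
    | cons c t =>
      by_cases h : old.isPrefixOf (c :: t) = true
      · rw [PySem.Chars.replace.go, PySem.Chars.replace.go, if_pos h, if_pos h,
            ih _ (new.reverse ++ acc), ih _ (new.reverse ++ [])]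
        simp
      · rw [PySem.Chars.replace.go, PySem.Chars.replace.go, if_neg h, if_neg h,
            ih t (c :: acc), ih t (c :: [])]
        simp

lemma go_eq_stripR : ∀ (fuel : Nat) (l : List Char), l.length ≤ fuel →
    PySem.Chars.replace.go pvPat [] fuel l [] = stripR l := by
  intro fuel
  induction fuel with
  | zero =>
    intro l hl
    have : l = [] := List.eq_nil_of_length_eq_zero (by omega)
    subst this; simp [PySem.Chars.replace.go, stripR]
  | succ f ih =>
    intro l hl
    cases l with
    | nil => simp [PySem.Chars.replace.go, stripR]
    | cons c t =>
      by_cases h : pvPat.isPrefixOf (c :: t) = true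
      · rw [PySem.Chars.replace.go, if_pos h]
        simp only [List.reverse_nil, List.nil_append]
        have hlen : ((c :: t).drop pvPat.length).length ≤ f := by
          simp [pvPat_length] at *; omega
        rw [ih _ hlen, stripR, if_pos h]
        congr 1
      · rw [PySem.Chars.replace.go, if_neg h, go_acc, ih t (by simp at hl; omega), stripR, if_neg h]
        simp

lemma head_of_singleton_prefix {c : Char} {l : List Char} (h : [c] <+: l) : l.head? = some c := by
  obtain ⟨t, rfl⟩ := h; rfl

lemma find_rb (rest : List Char) : PySem.Chars.find (pvPat ++ rest) [']'] = 6 := by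
  have h6 : [']'] <+: (pvPat ++ rest).drop 6 := by
    have : (pvPat ++ rest).drop 6 = ']' :: rest := by
      have : pvPat = '[' :: '/' :: 'f' :: 'o' :: 'n' :: 't' :: ']' :: [] := by decide
      rw [this]; rfl
    rw [this]
    exact ⟨rest, rfl⟩
  have hne : PySem.Chars.find (pvPat ++ rest) [']'] ≠ -1 := by
    apply (PySem.Chars.find_ne_neg_one_iff _ _).mpr
    obtain ⟨t2, ht⟩ := h6
    exact ⟨(pvPat ++ rest).take 6, t2, by rw [List.append_assoc, ht, List.take_append_drop]⟩
  have hz : ((0 : Nat) : Int) = (0 : Int) := rfl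
  have hspec := PySem.Chars.findFrom_natCast_spec (pvPat ++ rest) [']'] 0 (by omega)
  rw [hz, PySem.Chars.findFrom_zero] at hspec
  obtain ⟨hge, hpref, hmin⟩ := hspec hne
  set f := PySem.Chars.find (pvPat ++ rest) [']'] with hf
  have hmle : f.toNat ≤ 6 := by
    by_contra hgt
    exact hmin 6 (by omega) (by omega) h6
  have hmge : ¬ f.toNat < 6 := by
    intro hlt
    have hd : (pvPat ++ rest).drop f.toNat = pvPat.drop f.toNat ++ rest :=
      List.drop_append_of_le_length (by rw [pvPat_length]; omega)
    rw [hd] at hpref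
    have hh := head_of_singleton_prefix hpref
    interval_cases h : f.toNat <;> revert hh <;>
      · have : pvPat = '[' :: '/' :: 'f' :: 'o' :: 'n' :: 't' :: ']' :: [] := by decide
        rw [this]; simp
  omega

lemma loop_eq (s : List Char) : ∀ (fuel k : Nat) (acc : List Char), k ≤ s.length →
    s.length + 1 - k ≤ fuel →
    pvFontLoop s fuel (k : Int) acc = acc ++ stripR (s.drop k) := by
  intro fuel
  induction fuel with
  | zero => intro k acc hk hf; omega
  | succ f ih =>
    intro k acc hk hf
    rw [pvFontLoop]
    have hpat : "[/font]".toList = pvPat := rfl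
    simp only [hpat]
    rw [PySem.Chars.findFrom_natCast s pvPat k hk]
    by_cases h1 : PySem.Chars.find (s.drop k) pvPat = -1
    · rw [if_pos h1, if_pos rfl, PySem.List.slice_natCast s k s.length,
          List.take_of_length_le (by simp), stripR_noOcc _ ((PySem.Chars.find_eq_neg_one_iff _ _).mp h1)]
    · have hge : 0 ≤ PySem.Chars.find (s.drop k) pvPat := by
        have := PySem.Chars.neg_one_le_find (s.drop k) pvPat; omega
      set jN := (PySem.Chars.find (s.drop k) pvPat).toNat with hjN
      have hjeq : PySem.Chars.find (s.drop k) pvPat = (jN : Int) := by omega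
      have hcast : (k : Int) + (jN : Int) = ((k + jN : Nat) : Int) := by push_cast; ring
      rw [if_neg h1, hjeq, hcast, if_neg (by omega), PySem.List.slice_natCast s k (k + jN)]
      have hspec := PySem.Chars.findFrom_natCast_spec s pvPat k hk
      rw [PySem.Chars.findFrom_natCast s pvPat k hk, if_neg h1, hjeq, hcast] at hspec
      obtain ⟨hkle, hpref, hmin⟩ := hspec (by omega)
      rw [Int.toNat_natCast] at hpref hmin
      obtain ⟨rest, hrest⟩ := hpref
      have hlen7 : k + jN + 7 ≤ s.length := by
        have := congrArg List.length hrest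
        simp [pvPat_length] at this
        omega
      rw [PySem.Chars.findFrom_natCast s _ (k + jN) (by omega),
          show ("]".toList : List Char) = [']'] from rfl, ← hrest, find_rb,
          if_neg (by norm_num)]
      have hcast2 : ((k + jN : Nat) : Int) + 6 + 1 = ((k + jN + 7 : Nat) : Int) := by push_cast; ring
      rw [hcast2, ih (k + jN + 7) _ (by omega) (by omega)]
      have hsplit : stripR (s.drop k) = (s.drop k).take jN ++ stripR ((s.drop k).drop (jN + 7)) := by
        apply stripR_split
        · rw [List.drop_drop]; exact ⟨rest, hrest⟩
        · intro i hi
          have := hmin (k + i) (by omega) (by omega)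
          rw [List.drop_drop]
          exact this
      rw [hsplit, List.drop_drop, List.append_assoc]
      congr 3
      omega

-- ===== VERDICT (by name: the statement is the Claim_ definition above) =====
theorem dowithfont2_spec : Claim_equal_dowithfont2 := by
  intro str1 _
  unfold Spec_dowithfont2 dowithfont2 dowithfont2_alt PySem.Str.replace
  congr 1
  have hz : (0 : Int) = ((0 : Nat) : Int) := rfl
  rw [hz, loop_eq str1.toList (str1.toList.length + 1) 0 [] (by omega) (by omega)]
  rw [PySem.Chars.replace]
  have hpat : "[/font]".toList = pvPat := rfl
  have hemp : ("".toList : List Char) = [] := rfl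
  rw [hpat, hemp]
  rw [if_neg (by decide)]
  rw [go_eq_stripR str1.toList.length str1.toList (le_refl _)]
  simp
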